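-- pv_equiv track=rewrite | github.com/Shaik-Sohail-72/KMIT-Finishing-Schools | hello.py | gcdArrays
-- ===== SOURCE A (Python) =====
-- import math
--
-- def gcdArrays(arr):
--     n = len(arr)
--     max_gcd = 1
--     max_length = 0
--
--     for i in range(n):
--         current_gcd = arr[i]
--         current_length = 1
--
--         for j in range(i + 1, n):
--             current_gcd = math.gcd(current_gcd, arr[j])
--             current_length += 1
--
--             if current_gcd > max_gcd:
--                 max_gcd = current_gcd
--                 max_length = current_length
--             elif current_gcd == max_gcd and current_length > max_length:
--                 max_length = current_length
--
--     return [max_gcd, max_length]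
-- ===== SOURCE B (Python) =====
-- import math
--
-- def gcdArrays(arr):
--     # max adjacent-pair gcd bounds every subarray gcd; then longest divisible run
--     n = len(arr)
--     g = 0
--     for i in range(n - 1):
--         g = max(g, math.gcd(arr[i], arr[i + 1]))
--     if g == 0:
--         return [1, 0]
--     if g == 1:
--         return [1, n]
--     best = 0
--     run = 0
--     nz = 0
--     for x in arr:
--         if x % g == 0:
--             run += 1
--             if x != 0:
--                 nz = 1
--         else:
--             run = 0
--             nz = 0
--         if nz != 0 and run >= 2 and run > best:
--             best = run
--     return [g, best]
-- ===== Notes on version B (the rewrite author's own statement) =====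
-- stated objective: faster
-- what changed: Replaces the O(n^2) enumeration of all subarray gcds by one pass computing the maximum adjacent-pair gcd (which bounds every subarray gcd) plus one linear scan for the longest run of elements divisible by that maximum (containing a nonzero), with direct answers for the degenerate max 0/1 cases.
import Mathlib
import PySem

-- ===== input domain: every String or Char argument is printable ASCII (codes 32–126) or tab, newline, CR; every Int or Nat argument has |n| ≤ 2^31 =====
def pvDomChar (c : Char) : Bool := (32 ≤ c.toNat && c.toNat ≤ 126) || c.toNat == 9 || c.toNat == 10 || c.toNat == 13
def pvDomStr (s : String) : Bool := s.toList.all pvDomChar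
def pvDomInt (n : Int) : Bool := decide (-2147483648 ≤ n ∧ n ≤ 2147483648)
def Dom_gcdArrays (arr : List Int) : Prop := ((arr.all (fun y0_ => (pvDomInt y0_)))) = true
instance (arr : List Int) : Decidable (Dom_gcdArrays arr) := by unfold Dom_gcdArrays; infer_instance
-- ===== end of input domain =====

-- B replaces A's O(n^2) subarray-gcd enumeration by a linear pass: max adjacent-pair gcd, then the
-- longest run of elements divisible by it that contains a nonzero (degenerate maxima 0/1 answered directly).


-- ===== PORT A =====
-- inner-loop body of A (one step of the j-loop), on the fetched element value
def innerStep (st : (Int × Int) × Int × Int) (x : Int) : (Int × Int) × Int × Int :=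
  let cg : Int := Int.gcd st.2.1 x       -- current_gcd = math.gcd(current_gcd, arr[j])
  let cl : Int := st.2.2 + 1             -- current_length += 1
  if cg > st.1.1 then ((cg, cl), cg, cl)
  else if cg = st.1.1 ∧ cl > st.1.2 then ((st.1.1, cl), cg, cl)
  else (st.1, cg, cl)

def gcdArrays (arr : List Int) : List Int :=
  let n : Int := arr.length
  let res := (PySem.List.pyRange 0 n 1).foldl (fun (m : Int × Int) i =>
      -- current_gcd = arr[i]; current_length = 1  (i is always in range here, pyGetD is exact)
      ((PySem.List.pyRange (i + 1) n 1).foldl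
        (fun st j => innerStep st (PySem.List.pyGetD arr j 0))
        (m, PySem.List.pyGetD arr i 0, 1)).1)
    (1, 0)
  [res.1, res.2]

-- ===== PORT B =====
def gcdArrays_alt (arr : List Int) : List Int :=
  let n : Int := arr.length
  let g : Int := (PySem.List.pyRange 0 (n - 1) 1).foldl
    (fun g i => max g (Int.gcd (PySem.List.pyGetD arr i 0) (PySem.List.pyGetD arr (i + 1) 0))) 0
  if g = 0 then [1, 0]
  else if g = 1 then [1, n]
  else
    let st := arr.foldl (fun (st : Int × Int × Int) x =>
      let run : Int := if PySem.Int.mod x g = 0 then st.2.1 + 1 else 0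
      let nz : Int := if PySem.Int.mod x g = 0 then (if x ≠ 0 then 1 else st.2.2) else 0
      let best : Int := if nz ≠ 0 ∧ run ≥ 2 ∧ run > st.1 then run else st.1
      (best, run, nz)) ((0 : Int), (0 : Int), (0 : Int))
    [g, st.1]

-- ===== PRECONDITION & SPEC =====
def Spec_gcdArrays (arr : List Int) (out : List Int) : Prop := out = gcdArrays_alt arr
instance (arr : List Int) (out : List Int) : Decidable (Spec_gcdArrays arr out) := by unfold Spec_gcdArrays; infer_instance

-- ===== CLAIM (what is proved, stated in full; the proofs are below) =====
def Claim_equal_gcdArrays : Prop := ∀ (arr : List Int), Dom_gcdArrays arr → Spec_gcdArrays arr (gcdArrays arr)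

-- ===== LEMMAS AND PROOFS =====

-- gcd fold over a list from a seed, and the gcd of a whole list (A's subarray gcd values)
def gfold (c : Int) (t : List Int) : Int := t.foldl (fun a x => (Int.gcd a x : Int)) c
def gl (w : List Int) : Int := gfold 0 w

-- lexicographic comparison on (gcd, length) pairs — A's update rule keeps the lex-max
def lexLe (a b : Int × Int) : Prop := a.1 < b.1 ∨ (a.1 = b.1 ∧ a.2 ≤ b.2)
def lmax (s c : Int × Int) : Int × Int := if c.1 > s.1 ∨ (c.1 = s.1 ∧ c.2 > s.2) then c else s

-- A's whole computation as structural recursion over suffixes of arr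
def goA : List Int → (Int × Int) → (Int × Int)
  | [], m => m
  | x :: t, m => goA t ((t.foldl innerStep (m, x, 1)).1)

-- windows (contiguous subarrays of length ≥ 2) and what A tracks about them
def WinLe (r : Int × Int) (xs : List Int) : Prop :=
  ∀ p w s, xs = p ++ w ++ s → 2 ≤ w.length → lexLe (gl w, (w.length : Int)) r
def WinMem (r : Int × Int) (xs : List Int) (m : Int × Int) : Prop :=
  r = m ∨ ∃ p w s, xs = p ++ w ++ s ∧ 2 ≤ w.length ∧ r = (gl w, (w.length : Int))

-- B's run-scan step (syntactically the fold body of gcdArrays_alt) and pair maximum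
def scanStep (g : Int) (st : Int × Int × Int) (x : Int) : Int × Int × Int :=
  let run : Int := if PySem.Int.mod x g = 0 then st.2.1 + 1 else 0
  let nz : Int := if PySem.Int.mod x g = 0 then (if x ≠ 0 then 1 else st.2.2) else 0
  let best : Int := if nz ≠ 0 ∧ run ≥ 2 ∧ run > st.1 then run else st.1
  (best, run, nz)
def pmax (arr : List Int) : Int :=
  (PySem.List.pyRange 0 ((arr.length : Int) - 1) 1).foldl
    (fun g i => max g (Int.gcd (PySem.List.pyGetD arr i 0) (PySem.List.pyGetD arr (i + 1) 0))) 0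

-- a window all of whose elements are divisible by g and which contains a nonzero
def Valid (g : Int) (w : List Int) : Prop :=
  2 ≤ w.length ∧ (∀ x ∈ w, g ∣ x) ∧ ∃ x ∈ w, x ≠ 0

-- invariant of B's run scan
def ScanInv (g : Int) (l : List Int) (st : Int × Int × Int) : Prop :=
  (∃ l1 l2, l = l1 ++ l2 ∧ (l2.length : Int) = st.2.1 ∧ (∀ x ∈ l2, g ∣ x) ∧
      (∀ y, l1.getLast? = some y → ¬ g ∣ y) ∧ (st.2.2 ≠ 0 ↔ ∃ x ∈ l2, x ≠ 0)) ∧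
  0 ≤ st.1 ∧
  (∀ p w s, l = p ++ w ++ s → Valid g w → (w.length : Int) ≤ st.1) ∧
  (st.1 ≠ 0 → ∃ p w s, l = p ++ w ++ s ∧ Valid g w ∧ (w.length : Int) = st.1)

-- ---- order facts ----
theorem lexLe_refl (a : Int × Int) : lexLe a a := by unfold lexLe; omega
theorem lexLe_trans {a b c : Int × Int} (h1 : lexLe a b) (h2 : lexLe b c) : lexLe a c := by
  unfold lexLe at *; omega
theorem lexLe_antisymm {a b : Int × Int} (h1 : lexLe a b) (h2 : lexLe b a) : a = b := by
  unfold lexLe at *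
  have : a.1 = b.1 ∧ a.2 = b.2 := by omega
  exact Prod.ext this.1 this.2
theorem lexLe_lmax_left (m d : Int × Int) : lexLe m (lmax m d) := by
  unfold lexLe lmax; split_ifs <;> omega
theorem lexLe_lmax_right (m d : Int × Int) : lexLe d (lmax m d) := by
  unfold lexLe lmax; split_ifs <;> omega
theorem lmax_choice (m d : Int × Int) : lmax m d = m ∨ lmax m d = d := by
  unfold lmax; split_ifs <;> simp

-- ---- gcd-fold facts ----
theorem gfold_dvd_init (c : Int) (t : List Int) : gfold c t ∣ c := by
  induction t generalizing c with
  | nil => exact dvd_refl c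
  | cons y t ih =>
      have h1 : gfold (Int.gcd c y) t ∣ (Int.gcd c y : Int) := ih _
      exact dvd_trans h1 (Int.gcd_dvd_left c y)
theorem gfold_dvd_mem (c : Int) (t : List Int) : ∀ x ∈ t, gfold c t ∣ x := by
  induction t generalizing c with
  | nil => intro x hx; cases hx
  | cons y t ih =>
      intro x hx
      rcases List.mem_cons.mp hx with h | h
      · subst h
        exact dvd_trans (gfold_dvd_init _ t) (Int.gcd_dvd_right c x)
      · exact ih _ x h
theorem gfold_eq_zero (c : Int) (t : List Int) : gfold c t = 0 ↔ c = 0 ∧ ∀ x ∈ t, x = 0 := by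
  induction t generalizing c with
  | nil => simp [gfold]
  | cons y t ih =>
      have h : gfold c (y :: t) = gfold (Int.gcd c y) t := rfl
      rw [h, ih]
      constructor
      · rintro ⟨h0, hall⟩
        have h2 := Int.gcd_eq_zero_iff.mp (by exact_mod_cast h0)
        exact ⟨h2.1, by simpa [h2.2] using hall⟩
      · rintro ⟨h0, hall⟩
        have hy : y = 0 := hall y (List.mem_cons_self)
        exact ⟨by simp [h0, hy], fun x hx => hall x (List.mem_cons_of_mem _ hx)⟩
theorem dvd_gfold (g c : Int) (t : List Int) (hc : g ∣ c) (ht : ∀ x ∈ t, g ∣ x) : g ∣ gfold c t := by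
  induction t generalizing c with
  | nil => exact hc
  | cons y t ih =>
      exact ih _ (Int.dvd_coe_gcd hc (ht y List.mem_cons_self))
        (fun x hx => ht x (List.mem_cons_of_mem _ hx))
theorem gfold_nonneg (c : Int) (t : List Int) (hc : 0 ≤ c) : 0 ≤ gfold c t := by
  induction t generalizing c with
  | nil => exact hc
  | cons y t ih => exact ih _ (Int.natCast_nonneg _)
theorem gl_nonneg (w : List Int) : 0 ≤ gl w := gfold_nonneg 0 w le_rfl
theorem gl_cons (x : Int) (y : Int) (t : List Int) : gl (x :: y :: t) = gfold x (y :: t) := by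
  show gfold (Int.gcd 0 x) (y :: t) = gfold x (y :: t)
  show gfold (Int.gcd (Int.gcd 0 x : Int) y) t = gfold (Int.gcd x y : Int) t
  congr 2
  simp [Int.gcd, Int.natAbs_abs]

-- a helpful getD fact
theorem getD_append_len (q t : List Int) (y d : Int) : (q ++ y :: t).getD q.length d = y := by
  induction q with
  | nil => rfl
  | cons a q ih => simpa using ih

-- ---- inner loop of A: candidates are nonempty prefixes of the remaining list ----
theorem innerStep_eq (m : Int × Int) (c l x : Int) :
    innerStep (m, c, l) x = (lmax m ((Int.gcd c x : Int), l + 1), (Int.gcd c x : Int), l + 1) := by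
  unfold innerStep lmax
  simp only []
  split_ifs <;> simp_all <;> omega


theorem lexLe_mk (a1 a2 b1 b2 : Int) :
    lexLe (a1, a2) (b1, b2) ↔ (a1 < b1 ∨ (a1 = b1 ∧ a2 ≤ b2)) := Iff.rfl

theorem innerChar (t : List Int) (m : Int × Int) (c l : Int) :
    ((t.foldl innerStep (m, c, l)).1 = m ∨
      ∃ t1 t2, t = t1 ++ t2 ∧ t1 ≠ [] ∧
        (t.foldl innerStep (m, c, l)).1 = (gfold c t1, l + t1.length)) ∧
    lexLe m (t.foldl innerStep (m, c, l)).1 ∧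
    (∀ t1 t2, t = t1 ++ t2 → t1 ≠ [] →
      lexLe (gfold c t1, l + t1.length) (t.foldl innerStep (m, c, l)).1) := by
  induction t generalizing m c l with
  | nil =>
      refine ⟨Or.inl rfl, lexLe_refl m, ?_⟩
      intro t1 t2 h h1
      exact absurd (List.append_eq_nil_iff.mp h.symm).1 h1
  | cons x t ih =>
      have hstep : (x :: t).foldl innerStep (m, c, l) = t.foldl innerStep (innerStep (m, c, l) x) := rfl
      rw [hstep, innerStep_eq]
      obtain ⟨hmem, hle, hub⟩ := ih (lmax m ((Int.gcd c x : Int), l + 1)) (Int.gcd c x) (l + 1)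
      refine ⟨?_, ?_, ?_⟩
      · rcases hmem with h | ⟨t1, t2, ht, hne, hr⟩
        · rcases lmax_choice m ((Int.gcd c x : Int), l + 1) with h2 | h2
          · left; rw [h, h2]
          · right
            refine ⟨[x], t, rfl, by simp, ?_⟩
            rw [h, h2]
            simp [gfold]
        · right
          refine ⟨x :: t1, t2, by rw [ht]; rfl, by simp, ?_⟩
          rw [hr]
          have hg : gfold c (x :: t1) = gfold (Int.gcd c x : Int) t1 := rfl
          rw [hg]
          congr 1
          simp only [List.length_cons]
          push_cast
          omega
      · exact lexLe_trans (lexLe_lmax_left m _) hle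
      · intro t1 t2 ht hne
        cases t1 with
        | nil => exact absurd rfl hne
        | cons y t1' =>
          rw [List.cons_append] at ht
          injection ht with h1 h2
          subst h1
          cases t1' with
          | nil =>
            have heq : (gfold c [x], l + (([x] : List Int).length : Int))
                = ((Int.gcd c x : Int), l + 1) := by simp [gfold]
            rw [heq]
            exact lexLe_trans (lexLe_lmax_right m _) hle
          | cons z t1'' =>
            have hc := hub (z :: t1'') t2 h2 (by simp)
            have hg : gfold c (x :: z :: t1'') = gfold (Int.gcd c x : Int) (z :: t1'') := rfl
            have heq : (gfold c (x :: z :: t1''), l + ((x :: z :: t1'' : List Int).length : Int))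
                = (gfold (Int.gcd c x : Int) (z :: t1''), (l + 1) + ((z :: t1'' : List Int).length : Int)) := by
              rw [hg]
              congr 1
              simp only [List.length_cons]
              push_cast
              omega
            rw [heq]
            exact hc

-- ---- A's recursion computes the lex-max over all windows ----
theorem goA_char (xs : List Int) (m : Int × Int) :
    WinMem (goA xs m) xs m ∧ lexLe m (goA xs m) ∧ WinLe (goA xs m) xs := by
  induction xs generalizing m with
  | nil =>
      refine ⟨Or.inl rfl, lexLe_refl m, ?_⟩
      intro p w s h hl
      rw [List.append_assoc] at h
      obtain ⟨-, h2⟩ := List.append_eq_nil_iff.mp h.symm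
      obtain ⟨h3, -⟩ := List.append_eq_nil_iff.mp h2
      subst h3
      simp at hl
  | cons x t ih =>
      have hgo : goA (x :: t) m = goA t ((t.foldl innerStep (m, x, 1)).1) := rfl
      obtain ⟨imem, ile, iub⟩ := innerChar t m x 1
      obtain ⟨gmem, gle, gub⟩ := ih ((t.foldl innerStep (m, x, 1)).1)
      rw [hgo]
      refine ⟨?_, ?_, ?_⟩
      · rcases gmem with h | ⟨p, w, s, hdec, hl, hr⟩
        · rcases imem with h2 | ⟨t1, t2, ht, hne, hr2⟩
          · left; rw [h, h2]
          · right
            cases t1 with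
            | nil => exact absurd rfl hne
            | cons z t1' =>
              refine ⟨[], x :: z :: t1', t2, by simp [ht], by simp, ?_⟩
              rw [h, hr2, gl_cons]
              congr 1
              simp only [List.length_cons]
              push_cast
              omega
        · right
          exact ⟨x :: p, w, s, by rw [hdec]; rfl, hl, hr⟩
      · exact lexLe_trans ile gle
      · intro p w s hdec hl
        cases p with
        | nil =>
          simp only [List.nil_append] at hdec
          cases w with
          | nil => simp at hl
          | cons y w' =>
            rw [List.cons_append] at hdec
            injection hdec with h1 h2
            subst h1
            have hne : w' ≠ [] := by
              intro h
              subst h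
              simp at hl
            have hcand := iub w' s h2 hne
            have heq : (gl (x :: w'), ((x :: w').length : Int)) = (gfold x w', 1 + (w'.length : Int)) := by
              cases w' with
              | nil => exact absurd rfl hne
              | cons z w'' =>
                rw [gl_cons]
                congr 1
                simp only [List.length_cons]
                push_cast
                omega
            rw [heq]
            exact lexLe_trans hcand gle
        | cons y p' =>
          simp only [List.cons_append] at hdec
          injection hdec with h1 h2
          exact gub p' w s h2 hl

theorem outer_go (arr : List Int) : ∀ (xs pre : List Int) (m : Int × Int), arr = pre ++ xs →
    (PySem.List.pyRange (pre.length : Int) (arr.length : Int) 1).foldl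
      (fun m i => ((arr.drop (i + 1).toNat).foldl innerStep (m, PySem.List.pyGetD arr i 0, 1)).1) m
    = goA xs m := by
  intro xs
  induction xs with
  | nil =>
      intro pre m h
      have hle : (arr.length : Int) ≤ pre.length := by rw [h]; simp
      rw [PySem.List.pyRange_one_eq_nil hle]
      rfl
  | cons x t ih =>
      intro pre m h
      have hlt : (pre.length : Int) < arr.length := by
        rw [h]
        simp only [List.length_append, List.length_cons]
        push_cast
        omega
      rw [PySem.List.pyRange_one_cons hlt, List.foldl_cons]
      have hget : PySem.List.pyGetD arr (pre.length : Int) 0 = x := by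
        rw [PySem.List.pyGetD_natCast, h, getD_append_len]
      have hdrop : arr.drop ((pre.length : Int) + 1).toNat = t := by
        have h1 : ((pre.length : Int) + 1).toNat = pre.length + 1 := by omega
        have h2 : pre ++ x :: t = (pre ++ [x]) ++ t := by simp
        have h3 : pre.length + 1 = (pre ++ [x]).length := by simp
        rw [h1, h, h2, h3, List.drop_left]
      rw [hget, hdrop]
      have hnext := ih (pre ++ [x]) ((t.foldl innerStep (m, x, 1)).1) (by rw [h]; simp)
      have hlen : (((pre ++ [x]).length : Nat) : Int) = (pre.length : Int) + 1 := by
        simp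
      rw [hlen] at hnext
      exact hnext

theorem A_eq_goA (arr : List Int) :
    gcdArrays arr = [(goA arr (1, 0)).1, (goA arr (1, 0)).2] := by
  have hcong : (PySem.List.pyRange 0 (arr.length : Int) 1).foldl
      (fun (m : Int × Int) i =>
        ((PySem.List.pyRange (i + 1) (arr.length : Int) 1).foldl
          (fun st j => innerStep st (PySem.List.pyGetD arr j 0))
          (m, PySem.List.pyGetD arr i 0, 1)).1) (1, 0)
      = (PySem.List.pyRange 0 (arr.length : Int) 1).foldl
      (fun (m : Int × Int) i =>
        ((arr.drop (i + 1).toNat).foldl innerStep (m, PySem.List.pyGetD arr i 0, 1)).1) (1, 0) := by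
    apply List.foldl_ext
    intro a i hi
    have h0 : (0 : Int) ≤ i + 1 := by
      have := (PySem.List.mem_pyRange_one.mp hi).1
      omega
    rw [PySem.List.foldl_pyRange_pyGetD' arr 0 innerStep (a, PySem.List.pyGetD arr i 0, 1) h0]
  have hout := outer_go arr arr [] (1, 0) (by simp)
  simp only [List.length_nil, Nat.cast_zero] at hout
  have hdef : gcdArrays arr = [((PySem.List.pyRange 0 (arr.length : Int) 1).foldl
      (fun (m : Int × Int) i =>
        ((PySem.List.pyRange (i + 1) (arr.length : Int) 1).foldl
          (fun st j => innerStep st (PySem.List.pyGetD arr j 0))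
          (m, PySem.List.pyGetD arr i 0, 1)).1) (1, 0)).1,
      ((PySem.List.pyRange 0 (arr.length : Int) 1).foldl
      (fun (m : Int × Int) i =>
        ((PySem.List.pyRange (i + 1) (arr.length : Int) 1).foldl
          (fun st j => innerStep st (PySem.List.pyGetD arr j 0))
          (m, PySem.List.pyGetD arr i 0, 1)).1) (1, 0)).2] := rfl
  rw [hdef, hcong, hout]

theorem char_unique {xs : List Int} {m r r' : Int × Int}
    (h1 : WinMem r xs m) (h2 : lexLe m r) (h3 : WinLe r xs)
    (h4 : WinMem r' xs m) (h5 : lexLe m r') (h6 : WinLe r' xs) : r = r' := by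
  have le1 : lexLe r r' := by
    rcases h1 with h | ⟨p, w, s, hd, hl, hr⟩
    · rw [h]; exact h5
    · rw [hr]; exact h6 p w s hd hl
  have le2 : lexLe r' r := by
    rcases h4 with h | ⟨p, w, s, hd, hl, hr⟩
    · rw [h]; exact h2
    · rw [hr]; exact h3 p w s hd hl
  exact lexLe_antisymm le1 le2

-- ---- pair maximum facts ----
theorem pmax_nonneg (arr : List Int) : 0 ≤ pmax arr := by
  unfold pmax
  exact (PySem.List.le_foldl_max_int _ _ 0).1

theorem pmax_ub (arr q s : List Int) (a b : Int) (h : arr = q ++ a :: b :: s) :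
    (Int.gcd a b : Int) ≤ pmax arr := by
  have hlen : arr.length = q.length + (s.length + 2) := by
    rw [h]
    simp only [List.length_append, List.length_cons]
  have hmem : ((q.length : Nat) : Int) ∈ PySem.List.pyRange 0 ((arr.length : Int) - 1) 1 := by
    rw [PySem.List.mem_pyRange_one]
    constructor
    · exact Int.natCast_nonneg _
    · rw [hlen]; push_cast; omega
  have h1 : PySem.List.pyGetD arr ((q.length : Nat) : Int) 0 = a := by
    rw [PySem.List.pyGetD_natCast, h, getD_append_len]
  have h2 : PySem.List.pyGetD arr (((q.length : Nat) : Int) + 1) 0 = b := by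
    have hc : (((q.length : Nat) : Int) + 1) = ((q.length + 1 : Nat) : Int) := by push_cast; ring
    have h3 : q ++ a :: b :: s = (q ++ [a]) ++ b :: s := by simp
    have h4 : q.length + 1 = (q ++ [a]).length := by simp
    rw [hc, PySem.List.pyGetD_natCast, h, h3, h4, getD_append_len]
  have hub := (PySem.List.le_foldl_max_int (PySem.List.pyRange 0 ((arr.length : Int) - 1) 1)
    (fun i => (Int.gcd (PySem.List.pyGetD arr i 0) (PySem.List.pyGetD arr (i + 1) 0) : Int)) 0).2
    _ hmem
  unfold pmax
  simpa [h1, h2] using hub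

theorem decomp_at (arr : List Int) (k : Nat) (h : k + 2 ≤ arr.length) :
    ∃ q a b s, arr = q ++ a :: b :: s ∧ q.length = k ∧ arr.getD k 0 = a ∧ arr.getD (k + 1) 0 = b := by
  have h1 : k < arr.length := by omega
  have h2 : k + 1 < arr.length := by omega
  refine ⟨arr.take k, arr[k], arr[k + 1], arr.drop (k + 2), ?_, by simp; omega, ?_, ?_⟩
  · conv_lhs => rw [← List.take_append_drop k arr]
    congr 1
    rw [List.drop_eq_getElem_cons h1]
    congr 1
    exact List.drop_eq_getElem_cons h2
  · exact List.getD_eq_getElem arr 0 h1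
  · exact List.getD_eq_getElem arr 0 h2

theorem pmax_mem (arr : List Int) :
    pmax arr = 0 ∨ ∃ q a b s, arr = q ++ a :: b :: s ∧ pmax arr = (Int.gcd a b : Int) := by
  have hmap : pmax arr = ((PySem.List.pyRange 0 ((arr.length : Int) - 1) 1).map
      (fun i => (Int.gcd (PySem.List.pyGetD arr i 0) (PySem.List.pyGetD arr (i + 1) 0) : Int))).foldl max 0 := by
    unfold pmax
    exact Eq.symm List.foldl_map
  rcases PySem.List.foldl_max_mem ((PySem.List.pyRange 0 ((arr.length : Int) - 1) 1).map
      (fun i => (Int.gcd (PySem.List.pyGetD arr i 0) (PySem.List.pyGetD arr (i + 1) 0) : Int))) 0 with h | h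
  · left; rw [hmap]; exact h
  · right
    rw [← hmap] at h
    obtain ⟨i, hi, hf⟩ := List.mem_map.mp h
    obtain ⟨hi0, hilt⟩ := PySem.List.mem_pyRange_one.mp hi
    have hk : i.toNat + 2 ≤ arr.length := by omega
    obtain ⟨q, a, b, s, hdec, hql, ha, hb⟩ := decomp_at arr i.toNat hk
    refine ⟨q, a, b, s, hdec, ?_⟩
    have hi' : i = ((i.toNat : Nat) : Int) := by omega
    rw [hi', PySem.List.pyGetD_natCast, ha] at hf
    have hcast : ((i.toNat : Nat) : Int) + 1 = ((i.toNat + 1 : Nat) : Int) := by push_cast; ring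
    rw [hcast, PySem.List.pyGetD_natCast, hb] at hf
    exact hf.symm

-- ---- window gcd bounds ----
-- every element of a length-≥2 list sits in an adjacent pair of it
theorem mem_adj_pair (w : List Int) (x : Int) (hx : x ∈ w) (hl : 2 ≤ w.length) :
    ∃ w1 a b w2, w = w1 ++ a :: b :: w2 ∧ (x = a ∨ x = b) := by
  induction w with
  | nil => cases hx
  | cons y t ih =>
    cases t with
    | nil => simp at hl
    | cons z t' =>
      rcases List.mem_cons.mp hx with h | hx'
      · exact ⟨[], y, z, t', rfl, Or.inl h⟩
      · cases t' with
        | nil =>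
          have hxz : x = z := List.mem_singleton.mp hx'
          exact ⟨[], y, z, [], rfl, Or.inr hxz⟩
        | cons u t'' =>
          obtain ⟨w1, a, b, w2, heq, hab⟩ := ih hx' (by simp)
          exact ⟨y :: w1, a, b, w2, by rw [heq]; rfl, hab⟩

theorem window_le_pmax (arr p w s : List Int) (hd : arr = p ++ w ++ s) (hl : 2 ≤ w.length)
    (hnz : gl w ≠ 0) : gl w ≤ pmax arr := by
  have hex : ∃ x ∈ w, x ≠ 0 := by
    by_contra hall
    push_neg at hall
    exact hnz ((gfold_eq_zero 0 w).mpr ⟨rfl, hall⟩)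
  obtain ⟨x, hxw, hx0⟩ := hex
  obtain ⟨w1, a, b, w2, hw, hab⟩ := mem_adj_pair w x hxw hl
  have hdvda : gl w ∣ a := gfold_dvd_mem 0 w a (by rw [hw]; simp)
  have hdvdb : gl w ∣ b := gfold_dvd_mem 0 w b (by rw [hw]; simp)
  have hdvd : gl w ∣ (Int.gcd a b : Int) := Int.dvd_coe_gcd hdvda hdvdb
  have hab0 : (Int.gcd a b : Int) ≠ 0 := by
    intro h0
    have h2 := Int.gcd_eq_zero_iff.mp (by exact_mod_cast h0)
    rcases hab with rfl | rfl
    · exact hx0 h2.1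
    · exact hx0 h2.2
  have hpos : 0 < (Int.gcd a b : Int) := lt_of_le_of_ne (Int.natCast_nonneg _) (Ne.symm hab0)
  have hle : gl w ≤ (Int.gcd a b : Int) := Int.le_of_dvd hpos hdvd
  have hdec : arr = (p ++ w1) ++ a :: b :: (w2 ++ s) := by rw [hd, hw]; simp
  exact le_trans hle (pmax_ub arr _ _ a b hdec)

theorem valid_window_gl (arr p w s : List Int) (g : Int) (hd : arr = p ++ w ++ s)
    (hg : 2 ≤ g) (hgp : g = pmax arr) (hv : Valid g w) : gl w = g := by
  obtain ⟨hl, hdvd, x, hxw, hx0⟩ := hv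
  have h1 : g ∣ gl w := dvd_gfold g 0 w (dvd_zero g) hdvd
  have h2 : gl w ≠ 0 := by
    intro h0
    exact hx0 (((gfold_eq_zero 0 w).mp h0).2 x hxw)
  have h3 : gl w ≤ pmax arr := window_le_pmax arr p w s hd hl h2
  have h4 : 0 < gl w := lt_of_le_of_ne (gl_nonneg w) (Ne.symm h2)
  have h5 : g ≤ gl w := Int.le_of_dvd h4 h1
  omega

theorem gl_window_valid (w : List Int) (g : Int) (hl : 2 ≤ w.length) (hg : 2 ≤ g)
    (hgl : gl w = g) : Valid g w := by
  refine ⟨hl, ?_, ?_⟩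
  · intro x hx
    rw [← hgl]
    exact gfold_dvd_mem 0 w x hx
  · by_contra hall
    push_neg at hall
    have h0 : gl w = 0 := (gfold_eq_zero 0 w).mpr ⟨rfl, hall⟩
    omega

-- ---- B's run scan ----
theorem scanStep_dvd (g : Int) (st : Int × Int × Int) (x : Int) (h : g ∣ x) :
    scanStep g st x =
      (if (if x ≠ 0 then (1 : Int) else st.2.2) ≠ 0 ∧ st.2.1 + 1 ≥ 2 ∧ st.2.1 + 1 > st.1
        then st.2.1 + 1 else st.1,
       st.2.1 + 1, if x ≠ 0 then (1 : Int) else st.2.2) := by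
  simp [scanStep, PySem.Int.mod_eq_zero_iff_dvd, h]

theorem scanStep_not_dvd (g : Int) (st : Int × Int × Int) (x : Int) (h : ¬ g ∣ x) :
    scanStep g st x = (st.1, 0, 0) := by
  simp [scanStep, PySem.Int.mod_eq_zero_iff_dvd, h]

theorem scan_inv (g : Int) (l : List Int) : ScanInv g l (l.foldl (scanStep g) (0, 0, 0)) := by
  induction l using List.reverseRecOn with
  | nil =>
      refine ⟨⟨[], [], rfl, rfl, by simp, by simp, by simp⟩, le_rfl, ?_, ?_⟩
      · intro p w s h hv
        rw [List.append_assoc] at h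
        obtain ⟨-, h2⟩ := List.append_eq_nil_iff.mp h.symm
        obtain ⟨h3, -⟩ := List.append_eq_nil_iff.mp h2
        subst h3
        have := hv.1
        simp at this
      · intro h
        exact absurd rfl h
  | append_singleton l x ih =>
      rw [List.foldl_append, List.foldl_cons, List.foldl_nil]
      obtain ⟨⟨l1, l2, hdec, hlen, hdiv, hlast, hnz⟩, hb0, hub, hex⟩ := ih
      set st := l.foldl (scanStep g) (0, 0, 0) with hst
      have hl2nn : (0 : Int) ≤ st.2.1 := by rw [← hlen]; exact Int.natCast_nonneg _
      by_cases hdvd : g ∣ x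
      · rw [scanStep_dvd g st x hdvd]
        set nz' : Int := if x ≠ 0 then (1 : Int) else st.2.2 with hnzdef
        have hnz' : nz' ≠ 0 ↔ ∃ y ∈ l2 ++ [x], y ≠ 0 := by
          by_cases hx : x = 0
          · subst hx
            have hnzeq : nz' = st.2.2 := by rw [hnzdef]; simp
            rw [hnzeq, hnz]
            constructor
            · rintro ⟨y, hy, hy0⟩
              exact ⟨y, List.mem_append_left _ hy, hy0⟩
            · rintro ⟨y, hy, hy0⟩
              rcases List.mem_append.mp hy with h | h
              · exact ⟨y, h, hy0⟩
              · exact absurd (List.mem_singleton.mp h) hy0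
          · have hnzeq : nz' = 1 := by rw [hnzdef]; simp [hx]
            rw [hnzeq]
            constructor
            · intro _
              exact ⟨x, List.mem_append_right _ (by simp), hx⟩
            · intro _
              exact one_ne_zero
        have hrunlen : ((l2 ++ [x]).length : Int) = st.2.1 + 1 := by
          simp only [List.length_append, List.length_cons, List.length_nil]
          push_cast
          omega
        have hdiv' : ∀ y ∈ l2 ++ [x], g ∣ y := by
          intro y hy
          rcases List.mem_append.mp hy with h | h
          · exact hdiv y h
          · rw [List.mem_singleton.mp h]
            exact hdvd
        -- maximality of the current run among divisible suffixes
        have hsufb : ∀ w, (∀ y ∈ w, g ∣ y) → ∀ p', l ++ [x] = p' ++ w → w.length ≤ l2.length + 1 := by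
          intro w hw p' hp
          by_contra hgt
          push_neg at hgt
          have hsw : w <:+ l ++ [x] := ⟨p', hp.symm⟩
          have hs2 : l2 ++ [x] <:+ l ++ [x] := ⟨l1, by rw [hdec]; simp⟩
          have hsub : l2 ++ [x] <:+ w := List.suffix_of_suffix_length_le hs2 hsw (by simp; omega)
          obtain ⟨mid, hmid⟩ := hsub
          have hmidne : mid ≠ [] := by
            intro hm
            subst hm
            have := congrArg List.length hmid
            simp at this
            omega
          have hkey : l1 = p' ++ mid := by
            have e1 : (p' ++ mid) ++ (l2 ++ [x]) = l1 ++ (l2 ++ [x]) := by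
              rw [List.append_assoc, hmid, ← hp, hdec]
              simp
            exact (List.append_cancel_right e1).symm
          have hlast1 : l1.getLast? = some (mid.getLast hmidne) := by
            rw [hkey, List.getLast?_append_of_ne_nil p' hmidne]
            exact List.getLast?_eq_some_getLast hmidne
          have hdvdlast : g ∣ mid.getLast hmidne := by
            apply hw
            rw [← hmid]
            exact List.mem_append_left _ (List.getLast_mem hmidne)
          exact hlast _ hlast1 hdvdlast
        refine ⟨⟨l1, l2 ++ [x], by rw [hdec]; simp, hrunlen, hdiv', hlast, hnz'⟩, ?_, ?_, ?_⟩
        · split_ifs <;> omega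
        · intro p w s h hv
          rcases List.eq_nil_or_concat' s with rfl | ⟨s', y, rfl⟩
          · rw [List.append_nil] at h
            obtain ⟨hl2, hdivw, z, hzw, hz0⟩ := hv
            have hwle : w.length ≤ l2.length + 1 := hsufb w hdivw p h
            have hwsuf : w <:+ l2 ++ [x] :=
              List.suffix_of_suffix_length_le ⟨p, h.symm⟩ ⟨l1, by rw [hdec]; simp⟩ (by simp; omega)
            have hzmem : z ∈ l2 ++ [x] := hwsuf.subset hzw
            have hnzc : nz' ≠ 0 := hnz'.mpr ⟨z, hzmem, hz0⟩
            have hrge : (2 : Int) ≤ st.2.1 + 1 := by omega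
            split_ifs with hcond
            · omega
            · have hnr : ¬ st.2.1 + 1 > st.1 := fun hr => hcond ⟨hnzc, hrge, hr⟩
              omega
          · have h2 : l ++ [x] = (p ++ w ++ s') ++ [y] := by rw [h]; simp
            obtain ⟨h3, -⟩ := List.append_singleton_inj.mp h2
            have := hub p w s' h3 hv
            split_ifs <;> omega
        · intro hbne
          have hbne' : (if nz' ≠ 0 ∧ st.2.1 + 1 ≥ 2 ∧ st.2.1 + 1 > st.1 then st.2.1 + 1 else st.1) ≠ 0 := hbne
          by_cases hcond : nz' ≠ 0 ∧ st.2.1 + 1 ≥ 2 ∧ st.2.1 + 1 > st.1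
          · refine ⟨l1, l2 ++ [x], [], by rw [hdec]; simp, ⟨?_, hdiv', ?_⟩, ?_⟩
            · have h2 := hcond.2.1
              have h3 := hrunlen
              simp only [List.length_append, List.length_cons, List.length_nil] at h3 ⊢
              omega
            · exact hnz'.mp hcond.1
            · show ((l2 ++ [x]).length : Int)
                = if nz' ≠ 0 ∧ st.2.1 + 1 ≥ 2 ∧ st.2.1 + 1 > st.1 then st.2.1 + 1 else st.1
              rw [if_pos hcond]
              exact hrunlen
          · rw [if_neg hcond] at hbne'
            obtain ⟨p, w, s, h, hv, hlen2⟩ := hex hbne'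
            refine ⟨p, w, s ++ [x], by rw [h]; simp, hv, ?_⟩
            show (w.length : Int)
              = if nz' ≠ 0 ∧ st.2.1 + 1 ≥ 2 ∧ st.2.1 + 1 > st.1 then st.2.1 + 1 else st.1
            rw [if_neg hcond]
            exact hlen2
      · rw [scanStep_not_dvd g st x hdvd]
        refine ⟨⟨l ++ [x], [], by simp, rfl, by simp, ?_, by simp⟩, hb0, ?_, ?_⟩
        · intro y hy
          rw [List.getLast?_concat] at hy
          injection hy with hy
          subst hy
          exact hdvd
        · intro p w s h hv
          rcases List.eq_nil_or_concat' s with rfl | ⟨s', y, rfl⟩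
          · exfalso
            have hwne : w ≠ [] := by
              intro hw
              subst hw
              have := hv.1
              simp at this
            rw [List.append_nil] at h
            have hlast2 : (p ++ w).getLast? = some x := by
              rw [← h]
              exact List.getLast?_concat
            rw [List.getLast?_append_of_ne_nil p hwne] at hlast2
            have hxw : x ∈ w := List.mem_of_getLast? hlast2
            exact hdvd (hv.2.1 x hxw)
          · have h2 : l ++ [x] = (p ++ w ++ s') ++ [y] := by rw [h]; simp
            obtain ⟨h3, -⟩ := List.append_singleton_inj.mp h2
            exact hub p w s' h3 hv
        · intro hb
          obtain ⟨p, w, s, h, hv, hlen2⟩ := hex hb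
          exact ⟨p, w, s ++ [x], by rw [h]; simp, hv, hlen2⟩

-- ---- main equivalence ----
theorem AB_equal (arr : List Int) : gcdArrays arr = gcdArrays_alt arr := by
  have hA := A_eq_goA arr
  obtain ⟨amem, ale, aub⟩ := goA_char arr (1, 0)
  have hB : gcdArrays_alt arr =
      (if pmax arr = 0 then [1, 0] else if pmax arr = 1 then [(1 : Int), (arr.length : Int)]
       else [pmax arr, (arr.foldl (scanStep (pmax arr)) (0, 0, 0)).1]) := rfl
  by_cases h0 : pmax arr = 0
  · have hub : WinLe (1, 0) arr := by
      intro p w s hd hl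
      have hglz : gl w = 0 := by
        by_contra hne
        have hle1 := window_le_pmax arr p w s hd hl hne
        have hle2 := gl_nonneg w
        rw [h0] at hle1
        omega
      rw [hglz, lexLe_mk]
      omega
    have hr : goA arr (1, 0) = (1, 0) :=
      char_unique amem ale aub (Or.inl rfl) (lexLe_refl _) hub
    rw [hA, hr, hB, if_pos h0]
  · by_cases h1 : pmax arr = 1
    · obtain hm | ⟨q, a, b, s, hdec, hg⟩ := pmax_mem arr
      · exact absurd hm h0
      have hlen2 : 2 ≤ arr.length := by
        rw [hdec]
        simp only [List.length_append, List.length_cons]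
        omega
      have hglarr : gl arr = 1 := by
        have hda : gl arr ∣ a := gfold_dvd_mem 0 arr a (by rw [hdec]; simp)
        have hdb : gl arr ∣ b := gfold_dvd_mem 0 arr b (by rw [hdec]; simp)
        have hd1 : gl arr ∣ (Int.gcd a b : Int) := Int.dvd_coe_gcd hda hdb
        rw [← hg, h1] at hd1
        exact Int.eq_one_of_dvd_one (gl_nonneg arr) hd1
      have hmem' : WinMem (1, (arr.length : Int)) arr (1, 0) :=
        Or.inr ⟨[], arr, [], by simp, hlen2, by rw [hglarr]⟩
      have hle' : lexLe (1, 0) (1, (arr.length : Int)) := by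
        rw [lexLe_mk]
        omega
      have hub' : WinLe (1, (arr.length : Int)) arr := by
        intro p w s' hd hl
        have hwlen : w.length ≤ arr.length := by
          have := congrArg List.length hd
          simp at this
          omega
        rw [lexLe_mk]
        by_cases hglz : gl w = 0
        · omega
        · have hle2 := window_le_pmax arr p w s' hd hl hglz
          have hpos := gl_nonneg w
          rw [h1] at hle2
          omega
      have hr := char_unique amem ale aub hmem' hle' hub'
      rw [hA, hr, hB, if_neg h0, if_pos h1]
    · have hg2 : 2 ≤ pmax arr := by
        have := pmax_nonneg arr
        omega
      obtain hm | ⟨q, a, b, s, hdec, hg⟩ := pmax_mem arr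
      · exact absurd hm h0
      obtain ⟨-, hb0, hubi, hexi⟩ := scan_inv (pmax arr) arr
      have hvpair : Valid (pmax arr) [a, b] := by
        refine ⟨by simp, ?_, ?_⟩
        · intro y hy
          rcases List.mem_cons.mp hy with h | hy2
          · rw [h, hg]
            exact Int.gcd_dvd_left a b
          · rw [List.mem_singleton.mp hy2, hg]
            exact Int.gcd_dvd_right a b
        · by_contra hall
          push_neg at hall
          have ha0 : a = 0 := hall a (by simp)
          have hb0' : b = 0 := hall b (by simp)
          rw [ha0, hb0'] at hg
          simp [Int.gcd] at hg
          exact h0 hg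
      have hdec2 : arr = q ++ [a, b] ++ s := by rw [hdec]; simp
      have hb2 : (2 : Int) ≤ (arr.foldl (scanStep (pmax arr)) (0, 0, 0)).1 := by
        have := hubi q [a, b] s hdec2 hvpair
        simpa using this
      obtain ⟨p0, w0, s0, hdec0, hv0, hlen0⟩ := hexi (by omega)
      have hgl0 : gl w0 = pmax arr :=
        valid_window_gl arr p0 w0 s0 (pmax arr) hdec0 hg2 rfl hv0
      have hmem' : WinMem (pmax arr, (arr.foldl (scanStep (pmax arr)) (0, 0, 0)).1) arr (1, 0) :=
        Or.inr ⟨p0, w0, s0, hdec0, hv0.1, by rw [hgl0, hlen0]⟩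
      have hle' : lexLe (1, 0) (pmax arr, (arr.foldl (scanStep (pmax arr)) (0, 0, 0)).1) := by
        rw [lexLe_mk]
        omega
      have hub' : WinLe (pmax arr, (arr.foldl (scanStep (pmax arr)) (0, 0, 0)).1) arr := by
        intro p w s' hd hl
        rw [lexLe_mk]
        by_cases hglz : gl w = 0
        · omega
        · have hle2 := window_le_pmax arr p w s' hd hl hglz
          by_cases hgeq : gl w = pmax arr
          · have hvw := gl_window_valid w (pmax arr) hl hg2 hgeq
            have := hubi p w s' hd hvw
            omega
          · omega
      have hr := char_unique amem ale aub hmem' hle' hub'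
      rw [hA, hr, hB, if_neg h0, if_neg h1]

-- ===== VERDICT (by name: the statement is the Claim_ definition above) =====
theorem gcdArrays_spec : Claim_equal_gcdArrays := by
  intro arr _
  unfold Spec_gcdArrays
  exact AB_equal arr
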